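-- pv_equiv track=rewrite | github.com/cristi-iacob/advent-of-code-2019 | day1/day1.py | calculate_total_fuel_for_mass
-- ===== SOURCE A (Python) =====
-- def calculate_fuel(mass):
--     return mass // 3 - 2
--
-- def calculate_total_fuel_for_mass(mass):
--     total = 0
--
--     while mass > 0:
--         current_fuel = calculate_fuel(mass)
--
--         if current_fuel > 0:
--             total += current_fuel
--
--         mass = current_fuel
--
--     return total
-- ===== SOURCE B (Python) =====
-- def calculate_fuel(mass):
--     return mass // 3 - 2
--
-- def calculate_total_fuel_for_mass(mass):
--     fuel = calculate_fuel(mass)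
--     if fuel <= 0:
--         return 0
--     return fuel + calculate_total_fuel_for_mass(fuel)
-- ===== Notes on version B (the rewrite author's own statement) =====
-- stated objective: simpler
-- what changed: Replaced the while loop with an accumulator by the direct recurrence on the diminishing mass: fuel = mass // 3 - 2, returning 0 when fuel <= 0 and fuel + recursion(fuel) otherwise.
import Mathlib
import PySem

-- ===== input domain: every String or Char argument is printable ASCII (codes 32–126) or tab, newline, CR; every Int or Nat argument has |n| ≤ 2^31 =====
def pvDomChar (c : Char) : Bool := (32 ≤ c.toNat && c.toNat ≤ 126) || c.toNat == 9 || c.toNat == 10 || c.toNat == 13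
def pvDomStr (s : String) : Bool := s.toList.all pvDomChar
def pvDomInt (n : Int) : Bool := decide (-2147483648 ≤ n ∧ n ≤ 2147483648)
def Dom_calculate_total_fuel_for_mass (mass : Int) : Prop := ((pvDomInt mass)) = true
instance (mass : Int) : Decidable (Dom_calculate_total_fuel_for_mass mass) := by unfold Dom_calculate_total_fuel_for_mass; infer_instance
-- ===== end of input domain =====

-- B replaces A's while loop and accumulator by the direct recurrence on the diminishing mass (simpler decomposition, same cost).

-- fuel strictly decreases: used by both ports' termination proofs
theorem pv_fuel_lt (m : Int) (h : 0 < m) :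
    (PySem.Int.floordiv m 3 - 2).toNat < m.toNat := by
  have h3 : (0:Int) < 3 := by omega
  rw [PySem.Int.floordiv_eq_ediv_of_pos h3]
  have := Int.ediv_le_self 3 (le_of_lt h)
  have := Int.ediv_nonneg (le_of_lt h) (by omega : (0:Int) ≤ 3)
  omega

-- ===== PORT A =====
-- helper calculate_fuel
def calculate_fuel (mass : Int) : Int := PySem.Int.floordiv mass 3 - 2

-- the while loop of A, with the accumulator `total`
def pvALoop (total : Int) (mass : Int) : Int :=
  if h : 0 < mass then
    let current_fuel := calculate_fuel mass
    pvALoop (if 0 < current_fuel then total + current_fuel else total) current_fuel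
  else total
termination_by mass.toNat
decreasing_by exact pv_fuel_lt mass h

def calculate_total_fuel_for_mass (mass : Int) : Int := pvALoop 0 mass

-- ===== PORT B =====
def calculate_total_fuel_for_mass_alt (mass : Int) : Int :=
  let fuel := calculate_fuel mass
  if h : fuel ≤ 0 then 0
  else fuel + calculate_total_fuel_for_mass_alt fuel
termination_by mass.toNat
decreasing_by
  refine pv_fuel_lt mass ?_
  by_contra hm
  have hnp : PySem.Int.floordiv mass 3 < 1 :=
    (PySem.Int.floordiv_lt_iff_lt_mul (by omega)).mpr (by omega)
  have h' : ¬ calculate_fuel mass ≤ 0 := h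
  simp only [calculate_fuel] at h'
  omega

-- ===== PRECONDITION & SPEC =====
def Spec_calculate_total_fuel_for_mass (mass : Int) (out : Int) : Prop := out = calculate_total_fuel_for_mass_alt mass
instance (mass : Int) (out : Int) : Decidable (Spec_calculate_total_fuel_for_mass mass out) := by unfold Spec_calculate_total_fuel_for_mass; infer_instance

-- ===== CLAIM (what is proved, stated in full; the proofs are below) =====
def Claim_equal_calculate_total_fuel_for_mass : Prop := ∀ (mass : Int), Dom_calculate_total_fuel_for_mass mass → Spec_calculate_total_fuel_for_mass mass (calculate_total_fuel_for_mass mass)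

-- ===== LEMMAS AND PROOFS =====

-- fuel of any mass below 9 is non-positive
theorem pv_fuel_nonpos (x : Int) (h : x < 9) : calculate_fuel x ≤ 0 := by
  have := (PySem.Int.floordiv_lt_iff_lt_mul (a := x) (b := 3) (q := 3) (by omega)).mpr (by omega)
  simp only [calculate_fuel]
  omega

-- loop invariant: A's loop computes total + B's recursion
theorem pvALoop_eq (total mass : Int) :
    pvALoop total mass = total + calculate_total_fuel_for_mass_alt mass := by
  induction total, mass using pvALoop.induct with
  | case1 total m hm cf ih =>
      have hcf : cf = calculate_fuel m := rfl
      simp only [hcf] at ih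
      rw [pvALoop, calculate_total_fuel_for_mass_alt.eq_def]
      simp only [dif_pos hm]
      by_cases hf : 0 < calculate_fuel m
      · rw [dif_pos hf] at ih
        rw [if_pos hf, ih, dif_neg (by omega)]
        ring
      · rw [dif_neg hf] at ih
        rw [if_neg hf, ih, dif_pos (by omega)]
        -- B returns 0 on the next mass too: that fuel is non-positive again
        rw [calculate_total_fuel_for_mass_alt.eq_def,
            dif_pos (pv_fuel_nonpos _ (by omega))]
  | case2 total m hm =>
      rw [pvALoop, calculate_total_fuel_for_mass_alt.eq_def]
      simp only [dif_neg hm]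
      rw [dif_pos (pv_fuel_nonpos _ (by omega))]
      ring

-- ===== VERDICT (by name: the statement is the Claim_ definition above) =====
theorem calculate_total_fuel_for_mass_spec : Claim_equal_calculate_total_fuel_for_mass := by
  intro mass _
  unfold Spec_calculate_total_fuel_for_mass calculate_total_fuel_for_mass
  rw [pvALoop_eq]
  ring
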